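-- pv_equiv track=rewrite | github.com/andrada-strimbu/Python | Laboratorul2/Ex_4.py | compose
-- ===== SOURCE A (Python) =====
-- def compose(notes, moves, start_position):
--     song = []
--     current_position = start_position
--
--     for move in moves:
--         current_position += move
--
--         # Ensure the current position is within the bounds of the notes list
--         current_position %= len(notes)
--
--         song.append(notes[current_position])
--
--     return song
-- ===== SOURCE B (Python) =====
-- def compose(notes, moves, start_position):
--     # Different decomposition: first compute the cumulative positions (prefix
--     # sums of the moves offset by start_position), then map each through a
--     # single modulo into the notes list.  Folding the modulo into every step,
--     # as A does, gives the same indices.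
--     positions = []
--     total = start_position
--     for m in moves:
--         total += m
--         positions.append(total)
--     n = len(notes)
--     return [notes[p % n] for p in positions]
-- ===== Notes on version B (the rewrite author's own statement) =====
-- stated objective: alternative
-- what changed: B separates the walk into two passes: it first builds the raw cumulative positions (prefix sums, no modulo), then maps each through a single final modulo into notes, instead of A's one loop that renormalises the position modulo len(notes) at every step.
import Mathlib
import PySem

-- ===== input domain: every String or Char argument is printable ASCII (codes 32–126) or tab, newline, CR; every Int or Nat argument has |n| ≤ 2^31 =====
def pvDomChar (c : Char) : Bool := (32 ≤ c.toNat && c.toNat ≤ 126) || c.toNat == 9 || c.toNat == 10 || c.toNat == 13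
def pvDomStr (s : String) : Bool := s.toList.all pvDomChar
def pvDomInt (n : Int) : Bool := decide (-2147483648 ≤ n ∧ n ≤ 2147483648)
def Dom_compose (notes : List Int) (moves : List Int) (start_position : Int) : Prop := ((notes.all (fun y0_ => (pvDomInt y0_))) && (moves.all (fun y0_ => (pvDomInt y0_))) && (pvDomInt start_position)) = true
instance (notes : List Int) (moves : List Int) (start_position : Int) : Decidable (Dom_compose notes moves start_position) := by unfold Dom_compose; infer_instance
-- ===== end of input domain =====

-- B builds the raw cumulative positions first (prefix sums, no modulo) and then
-- maps each through a single final modulo into notes; A renormalises modulo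
-- len(notes) at every step of one loop.  Same cost; objective: alternative.

-- ===== PORT A =====
def compose (notes : List Int) (moves : List Int) (start_position : Int) : List Int :=
  (moves.foldl (fun (st : List Int × Int) move =>
      let c := PySem.Int.mod (st.2 + move) (notes.length : Int)
      (st.1 ++ [PySem.List.pyGetD notes c 0], c))
    ([], start_position)).1

-- ===== PORT B =====
def compose_alt (notes : List Int) (moves : List Int) (start_position : Int) : List Int :=
  let positions := (moves.foldl (fun (st : List Int × Int) m =>
      (st.1 ++ [st.2 + m], st.2 + m)) ([], start_position)).1
  positions.map (fun p => PySem.List.pyGetD notes (PySem.Int.mod p (notes.length : Int)) 0)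

-- ===== PRECONDITION & SPEC =====
-- Pre_ excludes only the inputs on which A raises ZeroDivisionError: empty notes with non-empty moves.
def Pre_compose (notes : List Int) (moves : List Int) (start_position : Int) : Prop :=
  notes ≠ [] ∨ moves = []
instance (notes : List Int) (moves : List Int) (start_position : Int) : Decidable (Pre_compose notes moves start_position) := by unfold Pre_compose; infer_instance
def pvWitness_compose : List Int × List Int × Int := ([4, 5, 6], [1, -3, 2], 0)

def Spec_compose (notes : List Int) (moves : List Int) (start_position : Int) (out : List Int) : Prop := out = compose_alt notes moves start_position
instance (notes : List Int) (moves : List Int) (start_position : Int) (out : List Int) : Decidable (Spec_compose notes moves start_position out) := by unfold Spec_compose; infer_instance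

-- ===== CLAIM (what is proved, stated in full; the proofs are below) =====
def Claim_equal_compose : Prop := ∀ (notes : List Int) (moves : List Int) (start_position : Int), Dom_compose notes moves start_position → Pre_compose notes moves start_position → Spec_compose notes moves start_position (compose notes moves start_position)

-- ===== LEMMAS AND PROOFS =====

-- the raw cumulative positions B's first loop computes (proof-side helper)
def pvPath (moves : List Int) (acc : Int) : List Int :=
  match moves with
  | [] => []
  | m :: ms => (acc + m) :: pvPath ms (acc + m)

theorem pvPath_foldB (moves : List Int) :
    ∀ (pre : List Int) (acc : Int),
      (moves.foldl (fun (st : List Int × Int) m =>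
          (st.1 ++ [st.2 + m], st.2 + m)) (pre, acc)).1 = pre ++ pvPath moves acc := by
  induction moves with
  | nil => intro pre acc; simp [pvPath]
  | cons m ms ih =>
      intro pre acc
      simp only [List.foldl, pvPath]
      rw [ih]
      simp

theorem mod_add_congr (n c acc m : Int) (hn : 0 < n)
    (h : PySem.Int.mod c n = PySem.Int.mod acc n) :
    PySem.Int.mod (c + m) n = PySem.Int.mod (acc + m) n := by
  simp only [PySem.Int.mod_eq_emod_of_pos hn] at h ⊢
  rw [Int.add_emod, h, ← Int.add_emod]

theorem pvFoldA (notes : List Int) (hn : notes ≠ []) (moves : List Int) :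
    ∀ (song : List Int) (c acc : Int),
      PySem.Int.mod c (notes.length : Int) = PySem.Int.mod acc (notes.length : Int) →
      (moves.foldl (fun (st : List Int × Int) move =>
          let c := PySem.Int.mod (st.2 + move) (notes.length : Int)
          (st.1 ++ [PySem.List.pyGetD notes c 0], c)) (song, c)).1 =
        song ++ (pvPath moves acc).map
          (fun p => PySem.List.pyGetD notes (PySem.Int.mod p (notes.length : Int)) 0) := by
  have hpos : 0 < (notes.length : Int) := by
    simpa using List.length_pos_iff.mpr hn
  induction moves with
  | nil => intro song c acc _; simp [pvPath]
  | cons m ms ih =>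
      intro song c acc h
      have hstep := mod_add_congr (notes.length : Int) c acc m hpos h
      simp only [List.foldl, pvPath, List.map]
      rw [hstep]
      rw [ih (song ++ [PySem.List.pyGetD notes (PySem.Int.mod (acc + m) (notes.length : Int)) 0])
          (PySem.Int.mod (acc + m) (notes.length : Int)) (acc + m)
          (by simp only [PySem.Int.mod_eq_emod_of_pos hpos]
              exact Int.emod_emod_of_dvd _ dvd_rfl)]
      simp

-- ===== VERDICT (by name: the statement is the Claim_ definition above) =====
theorem compose_spec : Claim_equal_compose := by
  intro notes moves start_position _ hpre
  unfold Spec_compose compose compose_alt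
  rcases hpre with hn | hm
  · rw [pvFoldA notes hn moves [] start_position start_position rfl,
        pvPath_foldB moves [] start_position]
    simp
  · subst hm; simp
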